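-- pv_equiv track=rewrite | github.com/rajtharani77/YouTube-AI-Assistant---Telegram-Bot | core/qa_engine.py | _find_relevant_chunk
-- ===== SOURCE A (Python) =====
-- def _find_relevant_chunk(question: str, chunks: list) -> str:
--     """
--     Find the most relevant chunk for a question
--     Uses keyword matching - can be improved with embeddings
--
--     Args:
--         question: User question
--         chunks: List of text chunks
--
--     Returns:
--         Most relevant chunk or None
--     """
--     keywords = question.lower().split()
--
--     # Score chunks by keyword matches
--     chunk_scores = []
--     for chunk in chunks:
--         chunk_lower = chunk.lower()
--         score = sum(1 for keyword in keywords if keyword in chunk_lower)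
--         chunk_scores.append((score, chunk))
--
--     # Return chunk with highest score
--     if chunk_scores:
--         chunk_scores.sort(reverse=True, key=lambda x: x[0])
--         return chunk_scores[0][1] if chunk_scores[0][0] > 0 else None
--
--     return None
-- ===== SOURCE B (Python) =====
-- def _find_relevant_chunk(question: str, chunks: list) -> str:
--     keywords = question.lower().split()
--     best_chunk = None
--     best_score = 0
--     for chunk in chunks:
--         chunk_lower = chunk.lower()
--         score = sum(1 for keyword in keywords if keyword in chunk_lower)
--         if score > best_score:
--             best_chunk = chunk
--             best_score = score
--     return best_chunk
-- ===== Notes on version B (the rewrite author's own statement) =====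
-- stated objective: simpler
-- what changed: Replaces building a (score, chunk) list and stably reverse-sorting it with a single pass that keeps the running best chunk, updating only on a strictly greater score (so the first chunk among ties wins, as in A).
import Mathlib
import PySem

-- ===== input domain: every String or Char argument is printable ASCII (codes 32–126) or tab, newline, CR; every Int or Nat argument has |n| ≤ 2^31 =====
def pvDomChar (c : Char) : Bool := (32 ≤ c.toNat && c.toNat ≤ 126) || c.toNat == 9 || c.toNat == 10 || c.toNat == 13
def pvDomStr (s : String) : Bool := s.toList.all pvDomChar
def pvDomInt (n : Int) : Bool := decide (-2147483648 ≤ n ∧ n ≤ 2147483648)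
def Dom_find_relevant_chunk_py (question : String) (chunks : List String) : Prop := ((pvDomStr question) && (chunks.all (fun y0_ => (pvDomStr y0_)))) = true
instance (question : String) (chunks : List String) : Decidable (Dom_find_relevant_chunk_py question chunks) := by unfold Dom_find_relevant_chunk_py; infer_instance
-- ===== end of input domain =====

-- B replaces A's score-list build + stable reverse sort with a single best-so-far pass (simpler; same results).


-- shared helper: score = sum(1 for keyword in keywords if keyword in chunk_lower)
def pvScore (keywords : List String) (chunk_lower : String) : Int :=
  keywords.foldl (fun s kw => if PySem.Str.isIn kw chunk_lower then s + 1 else s) 0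

-- ===== PORT A =====
def find_relevant_chunk_py (question : String) (chunks : List String) : Option String :=
  let keywords := PySem.Str.split₀ (PySem.Str.lower question)
  let chunk_scores := chunks.foldl
    (fun acc chunk => acc ++ [(pvScore keywords (PySem.Str.lower chunk), chunk)]) []
  match chunk_scores with
  | [] => none
  | _ :: _ =>
    match PySem.List.sorted chunk_scores (fun x => x.1) true with
    | [] => none
    | p :: _ => if p.1 > 0 then some p.2 else none

-- ===== PORT B =====
def find_relevant_chunk_py_alt (question : String) (chunks : List String) : Option String :=
  let keywords := PySem.Str.split₀ (PySem.Str.lower question)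
  (chunks.foldl
    (fun (st : Option String × Int) chunk =>
      let score := pvScore keywords (PySem.Str.lower chunk)
      if score > st.2 then (some chunk, score) else st)
    (none, 0)).1

-- ===== PRECONDITION & SPEC =====
def Spec_find_relevant_chunk_py (question : String) (chunks : List String) (out : Option String) : Prop := out = find_relevant_chunk_py_alt question chunks
instance (question : String) (chunks : List String) (out : Option String) : Decidable (Spec_find_relevant_chunk_py question chunks out) := by unfold Spec_find_relevant_chunk_py; infer_instance

-- ===== CLAIM (what is proved, stated in full; the proofs are below) =====
def Claim_equal_find_relevant_chunk_py : Prop := ∀ (question : String) (chunks : List String), Dom_find_relevant_chunk_py question chunks → Spec_find_relevant_chunk_py question chunks (find_relevant_chunk_py question chunks)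

-- ===== LEMMAS AND PROOFS =====

-- the option-valued "first strict max" step that characterises the head of A's reverse sort
def pvStepA (g : String → Int) (o : Option (Int × String)) (c : String) : Option (Int × String) :=
  match o with
  | none => some (g c, c)
  | some y => if y.1 < g c then some (g c, c) else some y

lemma pvScore_nonneg_aux (p : String → Bool) (l : List String) (a : Int) (ha : 0 ≤ a) :
    0 ≤ l.foldl (fun s kw => if p kw then s + 1 else s) a := by
  induction l generalizing a with
  | nil => exact ha
  | cons x t ih =>
    simp only [List.foldl_cons]
    split_ifs <;> exact ih _ (by omega)

lemma pvScore_nonneg (keywords : List String) (c : String) : 0 ≤ pvScore keywords c :=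
  pvScore_nonneg_aux _ keywords 0 le_rfl

lemma head?_insertBy (x : Int × String) (ys : List (Int × String)) :
    (PySem.List.insertBy (fun a b => decide ((fun p => p.1) b < (fun p => p.1) a)) x ys).head? =
      (match ys with
       | [] => some x
       | y :: _ => if y.1 < x.1 then some x else some y) := by
  cases ys with
  | nil => simp [PySem.List.insertBy]
  | cons y t =>
    simp only [PySem.List.insertBy]
    by_cases h : y.1 < x.1
    · simp [h]
    · simp [h]

lemma head?_foldl_insertBy (g : String → Int) (l : List String) (acc : List (Int × String)) :
    (l.foldl (fun acc c =>
        PySem.List.insertBy (fun a b => decide ((fun p => p.1) b < (fun p => p.1) a)) (g c, c) acc) acc).head? =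
      l.foldl (fun o c => pvStepA g o c) acc.head? := by
  induction l generalizing acc with
  | nil => rfl
  | cons c t ih =>
    simp only [List.foldl_cons]
    rw [ih, head?_insertBy]
    cases acc with
    | nil => rfl
    | cons y ys => simp [pvStepA]

-- the invariant tying A's option fold to B's (best, best_score) fold
def pvRel (o : Option (Int × String)) (st : Option String × Int) : Prop :=
  (o = none ∧ st = (none, 0)) ∨
  (∃ c, o = some (0, c) ∧ st = (none, 0)) ∨
  (∃ s c, 0 < s ∧ o = some (s, c) ∧ st = (some c, s))

lemma pvRel_step (g : String → Int) (hg : ∀ c, 0 ≤ g c) (o : Option (Int × String))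
    (st : Option String × Int) (c : String) (h : pvRel o st) :
    pvRel (pvStepA g o c) (if g c > st.2 then (some c, g c) else st) := by
  rcases h with ⟨ho, hst⟩ | ⟨d, ho, hst⟩ | ⟨s, d, hs, ho, hst⟩ <;> subst ho <;> subst hst
  · by_cases hgc : 0 < g c
    · simp only [pvStepA, gt_iff_lt, hgc, if_pos]
      exact Or.inr (Or.inr ⟨g c, c, hgc, rfl, rfl⟩)
    · have : g c = 0 := le_antisymm (by omega) (hg c)
      simp only [pvStepA, gt_iff_lt, this]
      exact Or.inr (Or.inl ⟨c, by simp, by simp⟩)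
  · by_cases hgc : 0 < g c
    · simp only [pvStepA, gt_iff_lt, hgc, if_pos]
      exact Or.inr (Or.inr ⟨g c, c, hgc, rfl, rfl⟩)
    · have h0 : g c = 0 := le_antisymm (by omega) (hg c)
      simp only [pvStepA, gt_iff_lt, h0, lt_self_iff_false, if_false]
      exact Or.inr (Or.inl ⟨d, rfl, rfl⟩)
  · by_cases hgc : s < g c
    · simp only [pvStepA, gt_iff_lt, hgc, if_pos]
      exact Or.inr (Or.inr ⟨g c, c, by omega, rfl, rfl⟩)
    · simp only [pvStepA, gt_iff_lt, hgc, if_false]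
      exact Or.inr (Or.inr ⟨s, d, hs, rfl, rfl⟩)

lemma pvRel_foldl (g : String → Int) (hg : ∀ c, 0 ≤ g c) (l : List String)
    (o : Option (Int × String)) (st : Option String × Int) (h : pvRel o st) :
    pvRel (l.foldl (fun o c => pvStepA g o c) o)
      (l.foldl (fun st c => if g c > st.2 then (some c, g c) else st) st) := by
  induction l generalizing o st with
  | nil => exact h
  | cons c t ih => exact ih _ _ (pvRel_step g hg o st c h)

lemma foldl_append_map (g : String → Int × String) (l : List String) (acc : List (Int × String)) :
    l.foldl (fun acc c => acc ++ [g c]) acc = acc ++ l.map g := by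
  induction l generalizing acc with
  | nil => simp
  | cons c t ih => simp [ih]

theorem pv_main (g : String → Int) (hg : ∀ c, 0 ≤ g c) (l : List String) :
    (match PySem.List.sorted (l.map (fun c => (g c, c))) (fun p => p.1) true with
       | [] => none
       | p :: _ => if p.1 > 0 then some p.2 else none) =
    (l.foldl (fun (st : Option String × Int) c =>
        if g c > st.2 then (some c, g c) else st) (none, 0)).1 := by
  have hsorted : (PySem.List.sorted (l.map (fun c => (g c, c))) (fun p => p.1) true).head? =
      l.foldl (fun o c => pvStepA g o c) none := by
    rw [PySem.List.sorted_rev_eq_foldl_insertBy, List.foldl_map, head?_foldl_insertBy g]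
    rfl
  have hrel := pvRel_foldl g hg l none (none, 0) (Or.inl ⟨rfl, rfl⟩)
  rcases hrel with ⟨ho, hst⟩ | ⟨d, ho, hst⟩ | ⟨s, d, hs, ho, hst⟩ <;>
    rw [ho] at hsorted <;> rw [hst] <;>
    rcases hS : PySem.List.sorted (l.map (fun c => (g c, c))) (fun p => p.1) true with _ | ⟨p, rest⟩ <;>
    rw [hS] at hsorted <;> simp_all

-- ===== VERDICT (by name: the statement is the Claim_ definition above) =====
theorem find_relevant_chunk_py_spec : Claim_equal_find_relevant_chunk_py := by
  intro question chunks _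
  unfold Spec_find_relevant_chunk_py find_relevant_chunk_py find_relevant_chunk_py_alt
  simp only []
  set kws := PySem.Str.split₀ (PySem.Str.lower question) with hkws
  set g : String → Int := fun c => pvScore kws (PySem.Str.lower c) with hg
  rw [foldl_append_map (fun c => (g c, c)) chunks []]
  cases chunks with
  | nil => rfl
  | cons c0 cs =>
    simp only [List.nil_append]
    rw [show ((c0 :: cs).map fun c => (g c, c)) = (g c0, c0) :: (cs.map fun c => (g c, c)) from rfl]
    have := pv_main g (fun c => pvScore_nonneg kws (PySem.Str.lower c)) (c0 :: cs)
    simpa using this
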